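-- pv_equiv track=rewrite | github.com/posl/comment_recommendation | script/mod_gen/5_time/zh/234_C/9.py | find
-- ===== SOURCE A (Python) =====
-- def find(k):
--     # 用队列来存储
--     queue = []
--     # 从1开始
--     queue.append(1)
--     # 计数器
--     count = 0
--     # 循环
--     while True:
--         # 弹出队列中的第一个元素
--         num = queue.pop(0)
--         # 计数器加1
--         count += 1
--         # 检查计数器是否与k相等
--         if count == k:
--             # 相等则返回
--             return num
--         # 检查num是否可以被10整除
--         if num % 10 == 0:
--             # 可以则将num乘以10加1
--             queue.append(num * 10 + 1)
--         # 将num乘以10加2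
--         queue.append(num * 10 + 2)
-- ===== SOURCE B (Python) =====
-- def find(k):
--     # The BFS queue only ever holds one number (1, 12, 122, ...), so the k-th
--     # value is the digit string 1 followed by (k-1) twos: (11*10^(k-1) - 2) / 9.
--     return (11 * 10 ** (k - 1) - 2) // 9
-- ===== Notes on version B (the rewrite author's own statement) =====
-- stated objective: faster
-- what changed: Replaced the BFS loop (whose queue provably always holds one element, the number 1 followed by twos) by the closed form (11*10^(k-1)-2)//9.
import Mathlib
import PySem

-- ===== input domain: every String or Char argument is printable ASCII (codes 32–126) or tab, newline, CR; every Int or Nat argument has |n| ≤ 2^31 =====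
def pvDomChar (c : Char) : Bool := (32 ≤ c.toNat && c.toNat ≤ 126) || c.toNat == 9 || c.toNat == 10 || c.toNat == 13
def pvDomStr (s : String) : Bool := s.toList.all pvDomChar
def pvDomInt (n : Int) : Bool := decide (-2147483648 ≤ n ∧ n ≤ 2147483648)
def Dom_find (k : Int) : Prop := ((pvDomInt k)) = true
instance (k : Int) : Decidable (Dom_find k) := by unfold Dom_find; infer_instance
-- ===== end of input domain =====

-- B replaces A's BFS loop (whose queue always holds exactly one element) by the
-- closed form (11*10^(k-1)-2)//9; objective: faster (asymptotically fewer bigint ops).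


-- ===== PORT A =====
-- the 'while True' loop; each iteration increments count and returns when count = k,
-- so (for k ≥ 1) k.toNat steps of fuel make it total; the fuel-0 / empty-queue
-- branches are unreachable under Pre_find.
def findLoop (fuel : Nat) (queue : List Int) (count k : Int) : Int :=
  match fuel with
  | 0 => 0
  | f + 1 =>
    match PySem.List.pop? queue 0 with
    | none => 0
    | some (num, rest) =>
      let count := count + 1
      if count = k then num
      else
        let rest := if PySem.Int.mod num 10 = 0 then rest ++ [num * 10 + 1] else rest
        findLoop f (rest ++ [num * 10 + 2]) count k

def find (k : Int) : Int := findLoop k.toNat [1] 0 k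

-- ===== PORT B =====
def find_alt (k : Int) : Int :=
  PySem.Int.floordiv (11 * 10 ^ (k - 1).toNat - 2) 9

-- ===== PRECONDITION & SPEC =====
-- A's loop never terminates for k ≤ 0 (count starts at 1 and only grows).
def Pre_find (k : Int) : Prop := 1 ≤ k
instance (k : Int) : Decidable (Pre_find k) := by unfold Pre_find; infer_instance
def pvWitness_find : Int := 3

def Spec_find (k : Int) (out : Int) : Prop := out = find_alt k
instance (k : Int) (out : Int) : Decidable (Spec_find k out) := by unfold Spec_find; infer_instance

-- ===== CLAIM (what is proved, stated in full; the proofs are below) =====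
def Claim_equal_find : Prop := ∀ (k : Int), Dom_find k → Pre_find k → Spec_find k (find k)

-- ===== LEMMAS AND PROOFS =====

-- the value "num followed by n twos"
def twos (num : Int) : Nat → Int
  | 0 => num
  | n + 1 => twos (num * 10 + 2) n

lemma twos_succ (num : Int) (n : Nat) : twos num (n + 1) = twos num n * 10 + 2 := by
  induction n generalizing num with
  | zero => rfl
  | succ m ih => simpa [twos] using ih (num * 10 + 2)

lemma twos_closed (num : Int) (n : Nat) :
    9 * twos num n = 9 * num * 10 ^ n + 2 * (10 ^ n - 1) := by
  induction n with
  | zero => simp [twos]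
  | succ m ih =>
    rw [twos_succ, pow_succ]
    linarith [ih]

lemma mod10_twos (n : Nat) : PySem.Int.mod (twos 1 n) 10 ≠ 0 := by
  cases n with
  | zero => decide
  | succ m =>
    rw [twos_succ]
    have h9 : 9 * twos 1 m = 9 * 1 * 10 ^ m + 2 * (10 ^ m - 1) := twos_closed 1 m
    rw [PySem.Int.mod_eq_emod_of_pos (by norm_num : (0:Int) < 10)]
    omega

-- loop invariant: with fuel f+1, a one-element queue [twos 1 j] and count = k - (f+1),
-- the loop returns twos 1 (k.toNat - 1)
lemma findLoop_inv (f : Nat) (j : Nat) (count k : Int)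
    (hk : count + (f + 1 : Nat) = k) :
    findLoop (f + 1) [twos 1 j] count k = twos 1 (j + f) := by
  induction f generalizing j count with
  | zero =>
    simp only [findLoop, PySem.List.pop?_zero_cons]
    have : count + 1 = k := by push_cast at hk; omega
    simp [this]
  | succ m ih =>
    have hne : ¬ (count + 1 = k) := by push_cast at hk ⊢; omega
    conv_lhs => rw [findLoop]
    simp only [PySem.List.pop?_zero_cons]
    rw [if_neg hne, if_neg (mod10_twos j)]
    simp only [List.nil_append, ← twos_succ]
    rw [ih (j + 1) (count + 1) (by push_cast at hk ⊢; omega)]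
    congr 1
    omega

lemma find_eq_twos (k : Int) (hk : 1 ≤ k) : find k = twos 1 (k.toNat - 1) := by
  unfold find
  obtain ⟨f, hf⟩ : ∃ f : Nat, k.toNat = f + 1 := ⟨k.toNat - 1, by omega⟩
  rw [hf]
  have := findLoop_inv f 0 0 k (by omega)
  simpa [hf] using this

lemma find_alt_eq_twos (k : Int) (hk : 1 ≤ k) : find_alt k = twos 1 (k.toNat - 1) := by
  unfold find_alt
  have h9 := twos_closed 1 (k.toNat - 1)
  have hexp : (k - 1).toNat = k.toNat - 1 := by omega
  rw [hexp]
  have hval : 11 * 10 ^ (k.toNat - 1) - 2 = twos 1 (k.toNat - 1) * 9 := by linarith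
  rw [hval, PySem.Int.floordiv_eq_ediv_of_pos (by norm_num : (0:Int) < 9)]
  simp

-- ===== VERDICT (by name: the statement is the Claim_ definition above) =====
theorem find_spec : Claim_equal_find := by
  intro k _ hk
  unfold Spec_find
  rw [find_eq_twos k hk, find_alt_eq_twos k hk]
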